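-- pv_equiv track=rewrite | github.com/henrylwong/leetcode-problems | medium/393_utf-8-validation.py | _parseNbyte
-- ===== SOURCE A (Python) =====
-- def _parseNbyte(data, idx):
--     n_val = 0
--     num = data[idx]
--     for i in range(7, 3, -1):
--         if (num >> i) & 0b1 == 1:
--             n_val += 1
--         else:
--             break
--
--     if n_val == 1:
--         return False, 0
--     if (num >> (7 - n_val)) & 0b1 == 1:
--         return False, 0
--
--     n = idx + 1
--     while n < idx + n_val:
--         if n >= len(data):
--             return False, 0
--         num = data[n]
--         if (num >> 6) & 0b11 != 0b10:
--             return False, 0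
--         n += 1
--
--     return True, n_val
-- ===== SOURCE B (Python) =====
-- def _parseNbyte(data, idx):
--     num = data[idx]
--     # classify the leading byte by one masked comparison per UTF-8 header pattern
--     if (num >> 7) & 0b1 == 0:
--         n_val = 0
--     elif (num >> 5) & 0b111 == 0b110:
--         n_val = 2
--     elif (num >> 4) & 0b1111 == 0b1110:
--         n_val = 3
--     elif (num >> 3) & 0b11111 == 0b11110:
--         n_val = 4
--     else:
--         return False, 0
--     if any(n >= len(data) or (data[n] >> 6) & 0b11 != 0b10
--            for n in range(idx + 1, idx + n_val)):
--         return False, 0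
--     return True, n_val
-- ===== Notes on version B (the rewrite author's own statement) =====
-- stated objective: idiomatic
-- what changed: The bit-by-bit leading-ones counting loop plus follow-up zero-bit check is replaced by direct masked-comparison classification of the first byte against the four UTF-8 header patterns, and the continuation-byte while-loop becomes a single any() over the index range.
import Mathlib
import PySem

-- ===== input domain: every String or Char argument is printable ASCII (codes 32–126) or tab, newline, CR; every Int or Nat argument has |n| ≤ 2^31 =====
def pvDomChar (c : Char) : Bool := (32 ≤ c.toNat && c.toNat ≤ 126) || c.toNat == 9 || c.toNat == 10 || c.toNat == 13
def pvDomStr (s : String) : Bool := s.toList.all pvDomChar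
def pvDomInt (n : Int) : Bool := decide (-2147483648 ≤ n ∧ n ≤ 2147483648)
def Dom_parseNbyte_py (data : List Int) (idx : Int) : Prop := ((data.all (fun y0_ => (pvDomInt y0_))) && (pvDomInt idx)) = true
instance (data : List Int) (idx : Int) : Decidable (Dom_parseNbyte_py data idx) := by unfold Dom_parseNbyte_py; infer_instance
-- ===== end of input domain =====

-- B replaces A's bit-counting loop by direct masked-comparison classification of the
-- first byte and folds the continuation-byte while-loop into one List.any over the
-- index range (objective: idiomatic; same cost).


-- ===== PORT A =====
-- 'for i in range(7, 3, -1): if (num >> i) & 1 == 1: n_val += 1 else: break'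
def pvA_lead (is : List Nat) (num : Int) (n_val : Int) : Int :=
  match is with
  | [] => n_val
  | i :: is' => if PySem.Int.band (num >>> i) 1 = 1 then pvA_lead is' num (n_val + 1) else n_val

-- 'while n < idx + n_val: …'; fuel = number of remaining iterations (idx + n_val - n).toNat
def pvA_while (data : List Int) (idx n_val n : Int) : Nat → Bool × Int
  | 0 => (true, n_val)
  | fuel + 1 =>
    if (data.length : Int) ≤ n then (false, 0)
    else
      match PySem.List.pyGet? data n with
      | none => (false, 0)   -- IndexError; unreachable: n ≥ idx+1 ≥ -len+1 here
      | some num =>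
        if PySem.Int.band (num >>> (6 : Nat)) 3 ≠ 2 then (false, 0)
        else pvA_while data idx n_val (n + 1) fuel

-- the two header checks and the continuation loop, given the computed n_val
def pvA_rest (data : List Int) (idx num n_val : Int) : Bool × Int :=
  if n_val = 1 then (false, 0)
  else if PySem.Int.band (num >>> (7 - n_val).toNat) 1 = 1 then (false, 0)
  else pvA_while data idx n_val (idx + 1) (n_val - 1).toNat

def parseNbyte_py (data : List Int) (idx : Int) : Bool × Int :=
  match PySem.List.pyGet? data idx with
  | none => (false, 0)   -- IndexError on data[idx]; excluded by Pre_
  | some num => pvA_rest data idx num (pvA_lead [7, 6, 5, 4] num 0)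

-- ===== PORT B =====
-- 'n >= len(data) or (data[n] >> 6) & 0b11 != 0b10'
def pvB_bad (data : List Int) (n : Int) : Bool :=
  decide ((data.length : Int) ≤ n) ||
    (match PySem.List.pyGet? data n with
     | none => true   -- IndexError; unreachable (short-circuited by the length test)
     | some num => decide (PySem.Int.band (num >>> (6 : Nat)) 3 ≠ 2))

-- 'if any(… for n in range(idx+1, idx+n_val)): return False, 0 / return True, n_val'
def pvB_tail (data : List Int) (idx n_val : Int) : Bool × Int :=
  if (PySem.List.pyRange (idx + 1) (idx + n_val) 1).any (pvB_bad data) then (false, 0)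
  else (true, n_val)

def parseNbyte_py_alt (data : List Int) (idx : Int) : Bool × Int :=
  match PySem.List.pyGet? data idx with
  | none => (false, 0)   -- IndexError on data[idx]; excluded by Pre_
  | some num =>
    if PySem.Int.band (num >>> (7 : Nat)) 1 = 0 then pvB_tail data idx 0
    else if PySem.Int.band (num >>> (5 : Nat)) 7 = 6 then pvB_tail data idx 2
    else if PySem.Int.band (num >>> (4 : Nat)) 15 = 14 then pvB_tail data idx 3
    else if PySem.Int.band (num >>> (3 : Nat)) 31 = 30 then pvB_tail data idx 4
    else (false, 0)

-- ===== PRECONDITION & SPEC =====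
-- Pre_: data[idx] must be a valid Python index (A raises IndexError otherwise).
def Pre_parseNbyte_py (data : List Int) (idx : Int) : Prop :=
  PySem.Raise.InRange data.length idx
instance (data : List Int) (idx : Int) : Decidable (Pre_parseNbyte_py data idx) := by
  unfold Pre_parseNbyte_py; infer_instance

def pvWitness_parseNbyte_py : List Int × Int := ([226, 128, 147], 0)

def Spec_parseNbyte_py (data : List Int) (idx : Int) (out : Bool × Int) : Prop := out = parseNbyte_py_alt data idx
instance (data : List Int) (idx : Int) (out : Bool × Int) : Decidable (Spec_parseNbyte_py data idx out) := by unfold Spec_parseNbyte_py; infer_instance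

-- ===== CLAIM (what is proved, stated in full; the proofs are below) =====
def Claim_equal_parseNbyte_py : Prop := ∀ (data : List Int) (idx : Int), Dom_parseNbyte_py data idx → Pre_parseNbyte_py data idx → Spec_parseNbyte_py data idx (parseNbyte_py data idx)

-- ===== LEMMAS AND PROOFS =====

-- a & (2^k - 1) = a % 2^k (Python semantics), at the masks the ports use
lemma pv_band_mask (a : Int) (k : Nat) (m M : Nat) (hm : m = 2 ^ k - 1) (hM : M = 2 ^ k) :
    PySem.Int.band a (m : Nat) = a % (M : Nat) := by
  subst hm hM
  unfold PySem.Int.band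
  have h2 : (0 : Int) ≤ ((2 ^ k - 1 : Nat) : Int) := by positivity
  by_cases h1 : (0 : Int) ≤ a
  · rw [if_pos h1, if_pos h2]
    rw [Int.toNat_natCast, Nat.and_two_pow_sub_one_eq_mod]
    have hpos : 0 < 2 ^ k := Nat.two_pow_pos k
    generalize hP : (2 : Nat) ^ k = P at *
    have h3 : a.toNat % P < P := Nat.mod_lt _ hpos
    have h4 : (P : Int) * ((a.toNat / P : Nat) : Int) + ((a.toNat % P : Nat) : Int) = (a.toNat : Int) := by
      exact_mod_cast Nat.div_add_mod a.toNat P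
    have h5 := Int.toNat_of_nonneg h1
    rw [show a % (P : Int) = (((a.toNat % P : Nat) : Int) + (P : Int) * ((a.toNat / P : Nat) : Int)) % P from congrArg (· % (P : Int)) (by linarith), Int.add_mul_emod_self_left, Int.emod_eq_of_lt (by omega) (by omega)]
  · rw [if_neg h1, if_pos h2]
    rw [Int.toNat_natCast, Nat.and_comm, Nat.and_two_pow_sub_one_eq_mod]
    have hpos : 0 < 2 ^ k := Nat.two_pow_pos k
    generalize hP : (2 : Nat) ^ k = P at *
    have hma : ((-a - 1).toNat : Int) = -a - 1 := Int.toNat_of_nonneg (by omega)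
    have h3 : (-a - 1).toNat % P < P := Nat.mod_lt _ hpos
    have h4 : (P : Int) * (((-a - 1).toNat / P : Nat) : Int) + (((-a - 1).toNat % P : Nat) : Int) = ((-a - 1).toNat : Int) := by
      exact_mod_cast Nat.div_add_mod (-a - 1).toNat P
    rw [show a % (P : Int) = (((P : Int) - 1 - (((-a - 1).toNat % P : Nat) : Int)) + (P : Int) * (-(((-a - 1).toNat / P : Nat) : Int) - 1)) % P from congrArg (· % (P : Int)) (by linarith), Int.add_mul_emod_self_left, Int.emod_eq_of_lt (by omega) (by omega)]
    omega
-- instances at the masks used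
lemma pv_band1 (a : Int) : PySem.Int.band a 1 = a % 2 := pv_band_mask a 1 1 2 rfl rfl
lemma pv_band7 (a : Int) : PySem.Int.band a 7 = a % 8 := pv_band_mask a 3 7 8 rfl rfl
lemma pv_band15 (a : Int) : PySem.Int.band a 15 = a % 16 := pv_band_mask a 4 15 16 rfl rfl
lemma pv_band31 (a : Int) : PySem.Int.band a 31 = a % 32 := pv_band_mask a 5 31 32 rfl rfl

lemma pv_shr (a : Int) (k : Nat) (c : Int) (hc : ((2 ^ k : Nat) : Int) = c) : a >>> k = a / c := by
  rw [Int.shiftRight_eq_div_pow, hc]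

-- A's continuation while-loop equals B's any-over-range form
lemma pv_loop (data : List Int) (idx v : Int) :
    ∀ (f : Nat) (n : Int), f = (idx + v - n).toNat →
      pvA_while data idx v n f =
        if (PySem.List.pyRange n (idx + v) 1).any (pvB_bad data) then (false, 0) else (true, v) := by
  intro f
  induction f with
  | zero =>
    intro n hn
    rw [PySem.List.pyRange_one_eq_nil (by omega)]
    simp [pvA_while]
  | succ t ih =>
    intro n hn
    have hlt : n < idx + v := by omega
    obtain ⟨o, ho⟩ : ∃ o, PySem.List.pyGet? data n = o := ⟨_, rfl⟩
    rw [PySem.List.pyRange_one_cons hlt]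
    simp only [pvA_while, pvB_bad, ho, List.any_cons]
    cases o with
    | none => simp
    | some num =>
      by_cases hl : (data.length : Int) ≤ n
      · simp [hl]
      · by_cases ht : PySem.Int.band (num >>> (6 : Nat)) 3 ≠ 2
        · simp [hl, ht]
        · have ht' : PySem.Int.band (num >>> (6 : Nat)) 3 = 2 := not_not.mp ht
          rw [ih (n + 1) (by omega)]
          have hc : (decide ((data.length : Int) ≤ n) ||
              decide (¬PySem.Int.band (num >>> (6 : Nat)) 3 = 2) ||
              (PySem.List.pyRange (n + 1) (idx + v) 1).any (pvB_bad data))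
              = (PySem.List.pyRange (n + 1) (idx + v) 1).any (pvB_bad data) := by
            rw [ht']
            simp [hl]
          rw [hc]
          simp [hl, ht']

-- ===== VERDICT (by name: the statement is the Claim_ definition above) =====
theorem parseNbyte_py_spec : Claim_equal_parseNbyte_py := by
  intro data idx _ hpre
  unfold Spec_parseNbyte_py parseNbyte_py parseNbyte_py_alt
  obtain ⟨num, hnum⟩ : ∃ num, PySem.List.pyGet? data idx = some num := by
    cases h : PySem.List.pyGet? data idx with
    | none =>
      have hpre' : PySem.Raise.InRange data.length idx := hpre
      exact absurd hpre' ((PySem.List.pyGet?_eq_none_iff data idx).mp h)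
    | some num => exact ⟨num, rfl⟩
  simp only [hnum]
  have e7 : num >>> (7 : Nat) = num / 128 := pv_shr num 7 128 (by norm_num)
  have e6 : num >>> (6 : Nat) = num / 64 := pv_shr num 6 64 (by norm_num)
  have e5 : num >>> (5 : Nat) = num / 32 := pv_shr num 5 32 (by norm_num)
  have e4 : num >>> (4 : Nat) = num / 16 := pv_shr num 4 16 (by norm_num)
  have e3 : num >>> (3 : Nat) = num / 8 := pv_shr num 3 8 (by norm_num)
  rcases Int.emod_two_eq (num / 128) with h7 | h7
  · -- bit7 = 0 : ASCII byte, n_val = 0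
    have hv : pvA_lead [7, 6, 5, 4] num 0 = 0 := by
      simp [pvA_lead, e7, pv_band1, h7]
    rw [hv]
    unfold pvA_rest
    simp only [show ((7 : Int) - 0).toNat = 7 from rfl, show ((0 : Int) - 1).toNat = 0 from rfl,
      e7, e5, e4, e3, pv_band1, pv_band7, pv_band15, pv_band31]
    rw [if_neg (by omega), if_neg (by omega), if_pos (by omega),
      pv_loop data idx 0 0 (idx + 1) (by omega)]
    rfl
  · rcases Int.emod_two_eq (num / 64) with h6 | h6
    · -- bits 7,6 = 1,0 : lone continuation byte, n_val = 1 → (False, 0) on both sides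
      have hv : pvA_lead [7, 6, 5, 4] num 0 = 1 := by
        simp [pvA_lead, e7, e6, pv_band1, h7, h6]
      rw [hv]
      unfold pvA_rest
      simp only [e7, e5, e4, e3, pv_band1, pv_band7, pv_band15, pv_band31]
      rw [if_pos trivial, if_neg (by omega), if_neg (by omega), if_neg (by omega), if_neg (by omega)]
    · rcases Int.emod_two_eq (num / 32) with h5 | h5
      · -- bits 7,6,5 = 1,1,0 : n_val = 2
        have hv : pvA_lead [7, 6, 5, 4] num 0 = 2 := by
          simp [pvA_lead, e7, e6, e5, pv_band1, h7, h6, h5]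
        rw [hv]
        unfold pvA_rest
        simp only [show ((7 : Int) - 2).toNat = 5 from rfl, show ((2 : Int) - 1).toNat = 1 from rfl,
          e7, e5, e4, e3, pv_band1, pv_band7, pv_band15, pv_band31]
        rw [if_neg (by omega), if_neg (by omega), if_neg (by omega), if_pos (by omega),
          pv_loop data idx 2 1 (idx + 1) (by omega)]
        rfl
      · rcases Int.emod_two_eq (num / 16) with h4 | h4
        · -- bits 7,6,5,4 = 1,1,1,0 : n_val = 3
          have hv : pvA_lead [7, 6, 5, 4] num 0 = 3 := by
            simp [pvA_lead, e7, e6, e5, e4, pv_band1, h7, h6, h5, h4]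
          rw [hv]
          unfold pvA_rest
          simp only [show ((7 : Int) - 3).toNat = 4 from rfl, show ((3 : Int) - 1).toNat = 2 from rfl,
            e7, e5, e4, e3, pv_band1, pv_band7, pv_band15, pv_band31]
          rw [if_neg (by omega), if_neg (by omega), if_neg (by omega), if_neg (by omega),
            if_pos (by omega), pv_loop data idx 3 2 (idx + 1) (by omega)]
          rfl
        · -- bits 7,6,5,4 all 1 : n_val = 4; bit 3 decides
          have hv : pvA_lead [7, 6, 5, 4] num 0 = 4 := by
            simp [pvA_lead, e7, e6, e5, e4, pv_band1, h7, h6, h5, h4]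
          rw [hv]
          unfold pvA_rest
          simp only [show ((7 : Int) - 4).toNat = 3 from rfl, show ((4 : Int) - 1).toNat = 3 from rfl,
            e7, e5, e4, e3, pv_band1, pv_band7, pv_band15, pv_band31]
          rcases Int.emod_two_eq (num / 8) with h3 | h3
          · rw [if_neg (by omega), if_neg (by omega), if_neg (by omega), if_neg (by omega),
              if_neg (by omega), if_pos (by omega), pv_loop data idx 4 3 (idx + 1) (by omega)]
            rfl
          · rw [if_neg (by omega), if_pos (by omega), if_neg (by omega), if_neg (by omega),
              if_neg (by omega), if_neg (by omega)]
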